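-- pv_equiv track=rewrite | github.com/lookitsssonya/ZhuravlevaSV | lab_11/src/z_function.py | z_search
-- ===== SOURCE A (Python) =====
-- from typing import List
--
-- def compute_z_function(text: str) -> List[int]:
--     """Вычисляет Z-функцию для строки.
--
--     Args:
--         text: Входная строка
--
--     Returns:
--         Список значений Z-функции
--     """
--     n = len(text)
--     if n == 0:
--         return []
--
--     z = [0] * n
--     left = 0
--     right = 0
--
--     for i in range(1, n):
--         if i <= right:
--             z[i] = min(right - i + 1, z[i - left])
--
--         while i + z[i] < n and text[z[i]] == text[i + z[i]]:
--             z[i] += 1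
--
--         if i + z[i] - 1 > right:
--             left = i
--             right = i + z[i] - 1
--
--     return z
--
-- def z_search(text: str, pattern: str) -> List[int]:
--     """Находит все вхождения подстроки в тексте с помощью Z-функции.
--
--     Args:
--         text: Текст для поиска
--         pattern: Искомая подстрока
--
--     Returns:
--         Список позиций начала вхождений подстроки
--     """
--     if not pattern:
--         return []
--
--     m = len(pattern)
--     n = len(text)
--
--     if m > n:
--         return []
--
--     combined = pattern + '$' + text
--     z = compute_z_function(combined)
--
--     occurrences = []
--
--     for i in range(m + 1, len(combined)):
--         if z[i] == m:
--             occurrences.append(i - m - 1)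
--
--     return occurrences
-- ===== SOURCE B (Python) =====
-- def z_search(text, pattern):
--     if not pattern:
--         return []
--     m = len(pattern)
--     return [i for i in range(len(text) - m + 1) if text[i:i + m] == pattern]
-- ===== Notes on version B (the rewrite author's own statement) =====
-- stated objective: simpler
-- what changed: Replaced the Z-function over pattern+'$'+text with a direct one-line scan that compares each length-m window slice of text to the pattern.
-- intended difference: On inputs where a (nonempty) pattern occurrence in text is immediately followed by the character '$', A's '$'-separator trick makes the z-value exceed m so A silently omits that occurrence, while B reports it; reporting every occurrence is the function's documented purpose. — e.g. on z_search("a$b", "a"): A returns [], B returns [0]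
import Mathlib
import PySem

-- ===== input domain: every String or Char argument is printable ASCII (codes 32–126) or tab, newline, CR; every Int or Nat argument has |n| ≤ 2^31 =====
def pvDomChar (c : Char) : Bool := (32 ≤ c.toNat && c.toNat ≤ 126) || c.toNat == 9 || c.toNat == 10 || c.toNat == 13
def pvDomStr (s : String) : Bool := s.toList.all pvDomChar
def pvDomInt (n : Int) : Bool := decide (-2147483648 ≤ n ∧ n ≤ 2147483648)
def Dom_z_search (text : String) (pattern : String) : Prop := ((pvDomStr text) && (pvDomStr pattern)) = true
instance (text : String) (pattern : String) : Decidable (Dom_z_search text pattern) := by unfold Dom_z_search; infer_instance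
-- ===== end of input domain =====

-- B replaces the Z-function over pattern+'$'+text by a direct window-by-window comparison (simpler);
-- on occurrences immediately followed by '$' in the text, A's separator trick misreports and B is right (see D_ below).

-- ===== PORT A =====
-- the inner `while i + z[i] < n and text[z[i]] == text[i + z[i]]: z[i] += 1` loop;
-- the fuel argument only bounds the number of iterations (exact: the loop cannot run
-- past i + z[i] = n), it never changes the computed value
def zextendGo (s : List Char) (i : Nat) : Nat → Nat → Nat
  | 0, k => k
  | fuel + 1, k =>
    if i + k < s.length ∧ s.getD k ' ' = s.getD (i + k) ' ' then zextendGo s i fuel (k + 1)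
    else k

def zextend (s : List Char) (i k : Nat) : Nat :=
  zextendGo s i (s.length - (i + k)) k

-- one iteration of the `for i in range(1, n)` loop; state = (z, left, right)
def zstep (s : List Char) (st : List Nat × Nat × Nat) (i : Nat) : List Nat × Nat × Nat :=
  let z := st.1
  let left := st.2.1
  let right := st.2.2
  let z1 := if i ≤ right then z.set i (min (right - i + 1) (z.getD (i - left) 0)) else z
  let z2 := z1.set i (zextend s i (z1.getD i 0))
  if right < i + z2.getD i 0 - 1 then (z2, i, i + z2.getD i 0 - 1) else (z2, left, right)

def compute_z_function (s : List Char) : List Nat :=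
  if s.length = 0 then []
  else ((List.range' 1 (s.length - 1)).foldl (zstep s) (List.replicate s.length 0, 0, 0)).1

def z_search (text : String) (pattern : String) : List Int :=
  let t := text.toList
  let p := pattern.toList
  if p = [] then []
  else
    let m := p.length
    let n := t.length
    if n < m then []
    else
      let combined := p ++ '$' :: t
      let z := compute_z_function combined
      (List.range' (m + 1) (combined.length - (m + 1))).foldl
        (fun acc i => if z.getD i 0 = m then acc ++ [(i : Int) - m - 1] else acc) []

-- ===== PORT B =====
def z_search_alt (text : String) (pattern : String) : List Int :=
  let t := text.toList
  let p := pattern.toList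
  if p = [] then []
  else
    List.map (fun i : Nat => (i : Int))
      ((List.range (t.length + 1 - p.length)).filter
        (fun i => (t.drop i).take p.length = p))

-- ===== PRECONDITION & SPEC =====
-- On inputs where a nonempty pattern occurrence in text is immediately followed by '$', A's
-- '$'-separator makes the z-value exceed m and A silently omits that occurrence, while B reports
-- it; reporting every occurrence is the function's documented purpose, so B's value is intended.
def D_z_search (text : String) (pattern : String) : Prop :=
  pattern ≠ "" ∧ '$' ∈ text.toList ∧ ∃ i < text.toList.length,
    (text.toList.drop i).take pattern.toList.length = pattern.toList ∧
    text.toList[i + pattern.toList.length]? = some '$'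
instance (text : String) (pattern : String) : Decidable (D_z_search text pattern) := by
  unfold D_z_search; infer_instance

def Spec_z_search (text : String) (pattern : String) (out : List Int) : Prop :=
  ¬ D_z_search text pattern → out = z_search_alt text pattern
instance (text : String) (pattern : String) (out : List Int) : Decidable (Spec_z_search text pattern out) := by
  unfold Spec_z_search; infer_instance

def pvDiffWitness_z_search : String × String := ("a$b", "a")
def pvDiffWitnessOut_z_search : (List Int) × (List Int) := ([], [0])

-- ===== CLAIM (what is proved, stated in full; the proofs are below) =====
def Claim_unchanged_z_search : Prop := ∀ (text : String) (pattern : String), Dom_z_search text pattern → Spec_z_search text pattern (z_search text pattern)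
def Claim_changed_z_search : Prop := Dom_z_search (pvDiffWitness_z_search.1) (pvDiffWitness_z_search.2) ∧ D_z_search (pvDiffWitness_z_search.1) (pvDiffWitness_z_search.2) ∧ z_search (pvDiffWitness_z_search.1) (pvDiffWitness_z_search.2) = pvDiffWitnessOut_z_search.1 ∧ z_search_alt (pvDiffWitness_z_search.1) (pvDiffWitness_z_search.2) = pvDiffWitnessOut_z_search.2 ∧ pvDiffWitnessOut_z_search.1 ≠ pvDiffWitnessOut_z_search.2
def Claim_exact_z_search : Prop := ∀ (text : String) (pattern : String), Dom_z_search text pattern → D_z_search text pattern → z_search text pattern ≠ z_search_alt text pattern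

-- ===== LEMMAS AND PROOFS =====

-- longest common prefix length
def lcp : List Char → List Char → Nat
  | a :: as, b :: bs => if a = b then lcp as bs + 1 else 0
  | _, _ => 0

theorem lcp_le_right : ∀ (a b : List Char), lcp a b ≤ b.length
  | [], b => by cases b <;> simp [lcp]
  | x :: as, [] => by simp [lcp]
  | x :: as, y :: bs => by
      simp only [lcp, List.length_cons]
      split
      · exact Nat.succ_le_succ (lcp_le_right as bs)
      · omega

theorem lcp_take : ∀ (a b : List Char), a.take (lcp a b) = b.take (lcp a b)
  | [], b => by cases b <;> simp [lcp]
  | x :: as, [] => by simp [lcp]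
  | x :: as, y :: bs => by
      simp only [lcp]
      split
      · next h => simp [List.take_succ_cons, h, lcp_take as bs]
      · simp

theorem lcp_get {a b : List Char} {k : Nat} (h : k < lcp a b) : a[k]? = b[k]? := by
  have h1 := lcp_take a b
  have h2 : (a.take (lcp a b))[k]? = (b.take (lcp a b))[k]? := by rw [h1]
  simpa [List.getElem?_take, h] using h2

theorem lcp_mismatch : ∀ (a b : List Char), lcp a b < a.length → lcp a b < b.length →
    a[lcp a b]? ≠ b[lcp a b]?
  | [], b => by intro h1 _; simp [lcp] at h1
  | x :: as, [] => by intro _ h2; simp [lcp] at h2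
  | x :: as, y :: bs => by
      intro h1 h2
      by_cases h : x = y
      · have hr : lcp (x :: as) (y :: bs) = lcp as bs + 1 := by
          simp only [lcp, if_pos h]
        rw [hr] at h1 h2 ⊢
        simp only [List.getElem?_cons_succ]
        exact lcp_mismatch as bs (by simpa using h1) (by simpa using h2)
      · have hr : lcp (x :: as) (y :: bs) = 0 := by
          simp only [lcp, if_neg h]
        rw [hr]
        simpa using h

theorem le_lcp : ∀ (a b : List Char) (k : Nat), a.take k = b.take k → k ≤ a.length →
    k ≤ b.length → k ≤ lcp a b := by
  intro a
  induction a with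
  | nil => intro b k _ hk _; simp at hk; omega
  | cons x as ih =>
    intro b k ht hk hk'
    cases b with
    | nil => simp at hk'; omega
    | cons y bs =>
      cases k with
      | zero => omega
      | succ k =>
        simp only [List.take_succ_cons, List.cons.injEq] at ht
        have hr : lcp (x :: as) (y :: bs) = lcp as bs + 1 := by
          simp only [lcp, if_pos ht.1]
        rw [hr]
        have := ih bs k ht.2 (by simpa using hk) (by simpa using hk')
        omega

-- zval char property: matched positions agree
theorem zval_get {s : List Char} {i k : Nat} (h : k < lcp s (s.drop i)) : s[k]? = s[i + k]? := by
  have := lcp_get h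
  rwa [List.getElem?_drop] at this

theorem zextendGo_eq (s : List Char) (i : Nat) :
    ∀ fuel k, s.length - (i + k) ≤ fuel → k ≤ lcp s (s.drop i) →
      zextendGo s i fuel k = lcp s (s.drop i) := by
  have hlcp : lcp s (s.drop i) ≤ s.length - i := by
    have := lcp_le_right s (s.drop i)
    simpa using this
  intro fuel
  induction fuel with
  | zero =>
    intro k hf hk
    simp only [zextendGo]
    omega
  | succ fuel ih =>
    intro k hf hk
    by_cases hkL : k < lcp s (s.drop i)
    · have hlen : i + k < s.length := by omega
      have h1 : k < s.length := by omega
      have hchar : s.getD k ' ' = s.getD (i + k) ' ' := by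
        have h := zval_get hkL
        simp only [List.getD_eq_getElem?_getD, h]
      rw [zextendGo, if_pos ⟨hlen, hchar⟩]
      exact ih (k + 1) (by omega) (by omega)
    · have hk' : k = lcp s (s.drop i) := by omega
      rcases Nat.lt_or_ge (i + k) s.length with hlen | hlen
      · have h1 : k < s.length := by omega
        have hmm := lcp_mismatch s (s.drop i) (by omega) (by simp; omega)
        rw [← hk'] at hmm
        rw [List.getElem?_drop] at hmm
        rw [zextendGo, if_neg]
        · exact hk'
        · rintro ⟨-, hc⟩
          apply hmm
          simp only [List.getD_eq_getElem?_getD, List.getElem?_eq_getElem h1,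
            List.getElem?_eq_getElem hlen, Option.getD_some] at hc
          simp [List.getElem?_eq_getElem h1, List.getElem?_eq_getElem hlen, hc]
      · rw [zextendGo, if_neg]
        · exact hk'
        · rintro ⟨hc, -⟩
          omega

theorem zextend_eq (s : List Char) (i : Nat) :
    ∀ k, k ≤ lcp s (s.drop i) → zextend s i k = lcp s (s.drop i) := by
  intro k hk
  exact zextendGo_eq s i _ k (Nat.le_refl _) hk

-- invariant of the main for-loop of compute_z_function
def ZInv (s : List Char) (i : Nat) (st : List Nat × Nat × Nat) : Prop :=
  st.1.length = s.length ∧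
  (∀ j, 1 ≤ j → j < i → st.1.getD j 0 = lcp s (s.drop j)) ∧
  (∀ j, i ≤ j → st.1.getD j 0 = 0) ∧
  ((st.2.1 = 0 ∧ st.2.2 = 0) ∨
    (1 ≤ st.2.1 ∧ st.2.1 < i ∧ st.2.2 + 1 = st.2.1 + lcp s (s.drop st.2.1)))

theorem getD_set_eq {z : List Nat} {i v : Nat} (h : i < z.length) : (z.set i v).getD i 0 = v := by
  simp [List.getD, h]

theorem getD_set_ne {z : List Nat} {i v j : Nat} (h : j ≠ i) : (z.set i v).getD j 0 = z.getD j 0 := by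
  simp [List.getD, List.getElem?_set_ne (by omega : i ≠ j)]

theorem lcp_drop_le (s : List Char) (x : Nat) : lcp s (s.drop x) ≤ s.length - x := by
  have := lcp_le_right s (s.drop x)
  simpa using this

theorem zstep_inv (s : List Char) (i : Nat) (hi : 1 ≤ i) (hin : i < s.length)
    (st : List Nat × Nat × Nat) (h : ZInv s i st) : ZInv s (i + 1) (zstep s st i) := by
  obtain ⟨z, left, right⟩ := st
  obtain ⟨hlen, hdone, hzero, hwin⟩ := h
  dsimp only at hlen hdone hzero hwin
  have hiz : i < z.length := by omega
  have hLle : lcp s (s.drop i) ≤ s.length - i := lcp_drop_le s i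
  have hkey : zstep s (z, left, right) i =
      (z.set i (lcp s (s.drop i)),
        if right < i + lcp s (s.drop i) - 1 then (i, i + lcp s (s.drop i) - 1)
        else (left, right)) := by
    by_cases hir : i ≤ right
    · rcases hwin with ⟨hl0, hr0⟩ | ⟨hl1, hli, hr⟩
      · omega
      have hzil : z.getD (i - left) 0 = lcp s (s.drop (i - left)) :=
        hdone (i - left) (by omega) (by omega)
      have hLl := lcp_drop_le s left
      have hLil := lcp_drop_le s (i - left)
      have hrlen : right + 1 ≤ s.length := by omega
      have hchar : ∀ k, k < min (right - i + 1) (z.getD (i - left) 0) → s[k]? = s[i + k]? := by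
        intro k hk
        rw [hzil] at hk
        have hk2 := Nat.lt_min.mp hk
        have e1 := zval_get (s := s) (i := i - left) hk2.2
        have e2 := zval_get (s := s) (i := left) (k := (i - left) + k) (by omega)
        rw [e1, e2]
        congr 1
        omega
      have hvL : min (right - i + 1) (z.getD (i - left) 0) ≤ lcp s (s.drop i) := by
        apply le_lcp
        · apply List.ext_getElem?
          intro k
          rw [List.getElem?_take, List.getElem?_take]
          by_cases hkv : k < min (right - i + 1) (z.getD (i - left) 0)
          · rw [if_pos hkv, if_pos hkv, List.getElem?_drop]
            exact hchar k hkv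
          · rw [if_neg hkv, if_neg hkv]
        · have := Nat.min_le_left (right - i + 1) (z.getD (i - left) 0)
          omega
        · simp only [List.length_drop]
          rw [hzil] at *
          omega
      have hze : zextend s i (min (right - i + 1) (z.getD (i - left) 0)) = lcp s (s.drop i) :=
        zextend_eq s i _ hvL
      simp only [zstep]
      rw [if_pos hir, getD_set_eq hiz, hze, List.set_set, getD_set_eq hiz]
      by_cases hc : right < i + lcp s (s.drop i) - 1 <;> simp [hc]
    · have hz0 : z.getD i 0 = 0 := hzero i (Nat.le_refl i)
      have hze : zextend s i 0 = lcp s (s.drop i) := zextend_eq s i 0 (Nat.zero_le _)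
      simp only [zstep]
      rw [if_neg hir, hz0, hze, getD_set_eq hiz]
      by_cases hc : right < i + lcp s (s.drop i) - 1 <;> simp [hc]
  rw [hkey]
  refine ⟨by simp [hlen], ?_, ?_, ?_⟩
  · intro j hj1 hj2
    rcases eq_or_ne j i with rfl | hne
    · dsimp only
      exact getD_set_eq hiz
    · dsimp only
      rw [getD_set_ne hne]
      exact hdone j hj1 (by omega)
  · intro j hj
    dsimp only
    rw [getD_set_ne (by omega)]
    exact hzero j (by omega)
  · dsimp only
    split_ifs with hc
    · refine Or.inr ⟨?_, ?_, ?_⟩ <;> simp <;> omega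
    · rcases hwin with ⟨h1, h2⟩ | ⟨h1, h2, h3⟩
      · exact Or.inl ⟨h1, h2⟩
      · exact Or.inr ⟨h1, by simp; omega, h3⟩

theorem foldl_zstep_inv (s : List Char) :
    ∀ (len a : Nat) (st : List Nat × Nat × Nat), 1 ≤ a → a + len ≤ s.length → ZInv s a st →
      ZInv s (a + len) ((List.range' a len).foldl (zstep s) st) := by
  intro len
  induction len with
  | zero => intro a st _ _ h; simpa using h
  | succ len ih =>
    intro a st ha hlen h
    have : List.range' a (len + 1) = a :: List.range' (a + 1) len := by
      simp [List.range'_succ]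
    rw [this, List.foldl_cons]
    have h1 := zstep_inv s a ha (by omega) st h
    have := ih (a + 1) (zstep s st a) (by omega) (by omega) h1
    simpa [Nat.add_assoc, Nat.add_comm 1 len] using this

theorem compute_z_correct (s : List Char) (j : Nat) (h1 : 1 ≤ j) (h2 : j < s.length) :
    (compute_z_function s).getD j 0 = lcp s (s.drop j) := by
  have hn : s.length ≠ 0 := by omega
  have hinit : ZInv s 1 (List.replicate s.length 0, 0, 0) := by
    refine ⟨by simp, by omega, ?_, Or.inl ⟨rfl, rfl⟩⟩
    intro j _
    simp [List.getD, List.getElem?_replicate]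
    split <;> simp
  have := foldl_zstep_inv s (s.length - 1) 1 _ (by omega) (by omega) hinit
  rw [compute_z_function, if_neg hn]
  exact this.2.1 j h1 (by omega)

-- characterization of the z-value used by A's final scan
theorem zval_combined (t p : List Char) (j : Nat) :
    (lcp (p ++ '$' :: t) ((p ++ '$' :: t).drop (p.length + 1 + j)) = p.length) ↔
      ((t.drop j).take p.length = p ∧ t[j + p.length]? ≠ some '$') := by
  have hdropC : (p ++ '$' :: t).drop (p.length + 1 + j) = t.drop j := by
    rw [List.drop_append, List.drop_eq_nil_of_le (by omega), List.nil_append,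
      show p.length + 1 + j - p.length = j + 1 by omega, List.drop_succ_cons]
  rw [hdropC]
  have hCm : (p ++ '$' :: t)[p.length]? = some '$' := by
    rw [List.getElem?_append_right (Nat.le_refl _), Nat.sub_self]
    simp
  have htkC : (p ++ '$' :: t).take p.length = p := by
    have := List.take_left (l₁ := p) (l₂ := '$' :: t)
    simpa using this
  constructor
  · intro hL
    have htake := lcp_take (p ++ '$' :: t) (t.drop j)
    rw [hL, htkC] at htake
    have hLr := lcp_le_right (p ++ '$' :: t) (t.drop j)
    rw [hL] at hLr
    simp only [List.length_drop] at hLr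
    refine ⟨htake.symm, ?_⟩
    by_cases hjm : j + p.length < t.length
    · have hmm := lcp_mismatch (p ++ '$' :: t) (t.drop j) (by simp; omega) (by simp; omega)
      rw [hL, hCm, List.getElem?_drop] at hmm
      exact fun h => hmm h.symm
    · rw [List.getElem?_eq_none (by omega)]
      simp
  · rintro ⟨htk, hne⟩
    have hlen : p.length ≤ t.length - j := by
      have := congrArg List.length htk
      simp [List.length_take] at this
      omega
    have hml : p.length ≤ lcp (p ++ '$' :: t) (t.drop j) := by
      apply le_lcp
      · rw [htkC, htk]
      · simp
      · simp
        omega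
    have hLm : lcp (p ++ '$' :: t) (t.drop j) ≤ p.length := by
      by_contra hgt
      push_neg at hgt
      have hget := lcp_get (a := p ++ '$' :: t) (b := t.drop j) (k := p.length) hgt
      rw [hCm, List.getElem?_drop] at hget
      exact hne hget.symm
    omega

-- the Prop-valued `if`-accumulating loop of A's final scan as filter/map
theorem foldl_append_ite {β : Type} (P : Nat → Prop) [DecidablePred P] (f : Nat → β) :
    ∀ (l : List Nat) (acc : List β),
      l.foldl (fun acc x => if P x then acc ++ [f x] else acc) acc =
        acc ++ (l.filter (fun x => decide (P x))).map f := by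
  intro l
  induction l with
  | nil => simp
  | cons x xs ih =>
    intro acc
    rw [List.foldl_cons, List.filter_cons]
    by_cases h : P x
    · rw [if_pos h, ih]
      simp [h]
    · rw [if_neg h, ih]
      simp [h]

-- A's result as filter/map, in the main case
theorem z_search_eq_filter (text pattern : String) (hp : pattern.toList ≠ [])
    (hmn : pattern.toList.length ≤ text.toList.length) :
    z_search text pattern =
      ((List.range text.toList.length).filter
          (fun j => (text.toList.drop j).take pattern.toList.length = pattern.toList ∧
            text.toList[j + pattern.toList.length]? ≠ some '$')).map (fun j : Nat => (j : Int)) := by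
  have hclen : (pattern.toList ++ '$' :: text.toList).length - (pattern.toList.length + 1) =
      text.toList.length := by
    rw [List.length_append, List.length_cons]
    omega
  simp only [z_search, if_neg hp,
    if_neg (show ¬ text.toList.length < pattern.toList.length by omega), hclen]
  rw [foldl_append_ite
      (fun i => (compute_z_function (pattern.toList ++ '$' :: text.toList)).getD i 0 =
        pattern.toList.length)
      (fun i => (i : Int) - pattern.toList.length - 1), List.nil_append]
  rw [List.range'_eq_map_range, List.filter_map, List.map_map]
  have hfilter :
      (List.range text.toList.length).filter
          ((fun x => decide
            ((compute_z_function (pattern.toList ++ '$' :: text.toList)).getD x 0 =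
              pattern.toList.length)) ∘ (fun x => pattern.toList.length + 1 + x)) =
        (List.range text.toList.length).filter
          (fun j => (text.toList.drop j).take pattern.toList.length = pattern.toList ∧
            text.toList[j + pattern.toList.length]? ≠ some '$') := by
    apply List.filter_congr
    intro j hj
    rw [List.mem_range] at hj
    simp only [Function.comp]
    rw [compute_z_correct (pattern.toList ++ '$' :: text.toList)
      (pattern.toList.length + 1 + j) (by omega)
      (by rw [List.length_append, List.length_cons]; omega)]
    exact decide_eq_decide.mpr (zval_combined text.toList pattern.toList j)
  rw [hfilter]
  apply List.map_congr_left
  intro j hj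
  simp only [Function.comp]
  push_cast
  ring

theorem main_equiv (text pattern : String) (hD : ¬ D_z_search text pattern) :
    z_search text pattern = z_search_alt text pattern := by
  by_cases hp : pattern.toList = []
  · simp [z_search, z_search_alt, hp]
  by_cases hmn : text.toList.length < pattern.toList.length
  · have hz : text.toList.length + 1 - pattern.toList.length = 0 := by omega
    simp only [z_search, z_search_alt, if_neg hp, if_pos hmn, hz, List.range_zero,
      List.filter_nil, List.map_nil]
  push_neg at hmn
  rw [z_search_eq_filter text pattern hp hmn]
  simp only [z_search_alt, if_neg hp]
  have hpne : pattern ≠ "" := fun h => hp (by rw [h]; rfl)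
  have hND : ∀ i, i < text.toList.length →
      (text.toList.drop i).take pattern.toList.length = pattern.toList →
      text.toList[i + pattern.toList.length]? ≠ some '$' := by
    intro i hi htk hdol
    exact hD ⟨hpne, List.mem_of_getElem? hdol, i, hi, htk, hdol⟩
  have hstep1 :
      (List.range text.toList.length).filter
          (fun j => (text.toList.drop j).take pattern.toList.length = pattern.toList ∧
            text.toList[j + pattern.toList.length]? ≠ some '$') =
        (List.range text.toList.length).filter
          (fun j => (text.toList.drop j).take pattern.toList.length = pattern.toList) := by
    apply List.filter_congr
    intro j hj
    rw [List.mem_range] at hj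
    refine decide_eq_decide.mpr ⟨fun h => h.1, fun h => ⟨h, hND j hj h⟩⟩
  rw [hstep1]
  have hp1 : 0 < pattern.toList.length := List.length_pos_of_ne_nil hp
  have hsplit : List.range text.toList.length =
      List.range (text.toList.length + 1 - pattern.toList.length) ++
        List.range' (text.toList.length + 1 - pattern.toList.length)
          (pattern.toList.length - 1) := by
    rw [List.range_eq_range', List.range_eq_range']
    have h2 := List.range'_append (s := 0)
      (m := text.toList.length + 1 - pattern.toList.length)
      (n := pattern.toList.length - 1) (step := 1)
    rw [Nat.one_mul, Nat.zero_add] at h2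
    have hnm : text.toList.length + 1 - pattern.toList.length +
        (pattern.toList.length - 1) = text.toList.length := by omega
    rw [hnm] at h2
    exact h2.symm
  rw [hsplit, List.filter_append]
  have hnil : (List.range' (text.toList.length + 1 - pattern.toList.length)
      (pattern.toList.length - 1)).filter
        (fun j => (text.toList.drop j).take pattern.toList.length = pattern.toList) = [] := by
    rw [List.filter_eq_nil_iff]
    intro j hj
    rw [List.mem_range'] at hj
    obtain ⟨i, hi, rfl⟩ := hj
    simp only [decide_eq_true_eq]
    intro htk
    have hlt := congrArg List.length htk
    rw [List.length_take, List.length_drop] at hlt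
    omega
  rw [hnil, List.append_nil]

-- ===== VERDICT (by name: the statement is the Claim_ definition above) =====
theorem z_search_spec : Claim_unchanged_z_search := by
  intro text pattern _ hD
  exact main_equiv text pattern hD

theorem z_search_changed : Claim_changed_z_search := by
  unfold Claim_changed_z_search; decide

theorem z_search_tight : Claim_exact_z_search := by
  intro text pattern _ hDD
  unfold D_z_search at hDD
  obtain ⟨hpne, -, i, hin, htk, hdol⟩ := hDD
  have hp : pattern.toList ≠ [] := fun h => hpne (String.toList_eq_nil_iff.mp h)
  have him : i + pattern.toList.length < text.toList.length := by
    rcases List.getElem?_eq_some_iff.mp hdol with ⟨h, _⟩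
    exact h
  have hmn : pattern.toList.length ≤ text.toList.length := by omega
  have hp1 : 0 < pattern.toList.length := List.length_pos_of_ne_nil hp
  intro heq
  have hiB : (i : Int) ∈ z_search_alt text pattern := by
    simp only [z_search_alt, if_neg hp]
    refine List.mem_map.mpr ⟨i, ?_, rfl⟩
    refine List.mem_filter.mpr ⟨List.mem_range.mpr (by omega), by simp only [decide_eq_true_eq]; exact htk⟩
  have hiA : (i : Int) ∉ z_search text pattern := by
    rw [z_search_eq_filter text pattern hp hmn]
    intro hmem
    rcases List.mem_map.mp hmem with ⟨j, hjf, hji⟩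
    have hji' : j = i := by exact_mod_cast hji
    subst hji'
    have hpred := (List.mem_filter.mp hjf).2
    simp only [decide_eq_true_eq] at hpred
    exact hpred.2 hdol
  rw [heq] at hiA
  exact hiA hiB
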